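-- pv_equiv track=rewrite | github.com/thettwe/myspellchecker | src/myspellchecker/algorithms/pos_inference.py | _select_primary_tag
-- ===== SOURCE A (Python) =====
-- def _select_primary_tag(tags: frozenset[str]) -> str | None:
--     """
--     Select primary tag from multiple options.
--
--     Priority order based on frequency in Myanmar:
--     N (noun) > V (verb) > ADJ > ADV > others
--
--     Args:
--         tags: Set of possible POS tags.
--
--     Returns:
--         Most likely primary tag.
--     """
--     if not tags:
--         return None
--
--     priority = ["N", "V", "ADJ", "ADV", "CONJ", "PRON", "INT"]
--     for tag in priority:
--         if tag in tags:
--             return tag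
--
--     # Return first tag if none in priority list
--     return next(iter(sorted(tags)))
-- ===== SOURCE B (Python) =====
-- def _select_primary_tag(tags):
--     if not tags:
--         return None
--     priority = ["N", "V", "ADJ", "ADV", "CONJ", "PRON", "INT"]
--     rank = {tag: i for i, tag in enumerate(priority)}
--     return min(tags, key=lambda t: (rank.get(t, len(priority)), t))
-- ===== Notes on version B (the rewrite author's own statement) =====
-- stated objective: idiomatic
-- what changed: Replaces A's 7-iteration priority scan with membership tests plus a full sort fallback by a precomputed rank dictionary and a single min pass over tags keyed by (rank, tag).
import Mathlib
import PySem

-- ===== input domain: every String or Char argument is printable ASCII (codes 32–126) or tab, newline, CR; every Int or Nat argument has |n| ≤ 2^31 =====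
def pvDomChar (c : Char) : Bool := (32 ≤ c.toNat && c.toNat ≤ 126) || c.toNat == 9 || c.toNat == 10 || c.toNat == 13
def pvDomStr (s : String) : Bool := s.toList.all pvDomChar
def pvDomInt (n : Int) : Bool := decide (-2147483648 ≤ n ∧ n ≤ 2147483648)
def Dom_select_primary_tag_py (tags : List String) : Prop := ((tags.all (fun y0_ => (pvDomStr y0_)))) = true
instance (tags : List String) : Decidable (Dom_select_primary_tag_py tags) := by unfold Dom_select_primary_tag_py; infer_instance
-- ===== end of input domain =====

-- B replaces A's 7-branch priority scan + sort by a rank dictionary and a single min pass over tags.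


-- ===== PORT A =====
-- priority = ["N", "V", "ADJ", "ADV", "CONJ", "PRON", "INT"]
def pvPriority : List String := ["N", "V", "ADJ", "ADV", "CONJ", "PRON", "INT"]

-- 'for tag in priority: if tag in tags: return tag' = first priority tag contained in tags;
-- 'next(iter(sorted(tags)))' = head of the sorted list (tags nonempty here).
def select_primary_tag_py (tags : List String) : Option String :=
  if tags = [] then none
  else
    match pvPriority.find? (fun tag => tags.contains tag) with
    | some t => some t
    | none => (PySem.List.sorted tags (fun x => x) false).head?

-- ===== PORT B =====
-- rank = {tag: i for i, tag in enumerate(priority)}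
def pvRank : PySem.Dict String Int :=
  ⟨[("N", 0), ("V", 1), ("ADJ", 2), ("ADV", 3), ("CONJ", 4), ("PRON", 5), ("INT", 6)]⟩

-- min(tags, key=lambda t: (rank.get(t, 7), t))
def select_primary_tag_py_alt (tags : List String) : Option String :=
  if tags = [] then none
  else PySem.List.min2? tags (fun t => pvRank.getD t 7) (fun t => t)

-- ===== PRECONDITION & SPEC =====
def Spec_select_primary_tag_py (tags : List String) (out : Option String) : Prop := out = select_primary_tag_py_alt tags
instance (tags : List String) (out : Option String) : Decidable (Spec_select_primary_tag_py tags out) := by unfold Spec_select_primary_tag_py; infer_instance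

-- ===== CLAIM (what is proved, stated in full; the proofs are below) =====
def Claim_equal_select_primary_tag_py : Prop := ∀ (tags : List String), Dom_select_primary_tag_py tags → Spec_select_primary_tag_py tags (select_primary_tag_py tags)

-- ===== LEMMAS AND PROOFS =====

-- the rank key of B, in closed form
def pvRk (t : String) : Int := pvRank.getD t 7

theorem pvRk_eq (t : String) : pvRk t =
    if t = "N" then 0 else if t = "V" then 1 else if t = "ADJ" then 2 else
    if t = "ADV" then 3 else if t = "CONJ" then 4 else if t = "PRON" then 5 else
    if t = "INT" then 6 else 7 := by
  simp only [pvRk, pvRank, PySem.Dict.getD, PySem.Dict.get?, List.find?]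
  by_cases h1 : t = "N"
  · subst h1; decide
  rw [show ("N" == t) = false from beq_eq_false_iff_ne.mpr (fun h => h1 h.symm), if_neg h1]
  by_cases h2 : t = "V"
  · subst h2; decide
  rw [show ("V" == t) = false from beq_eq_false_iff_ne.mpr (fun h => h2 h.symm), if_neg h2]
  by_cases h3 : t = "ADJ"
  · subst h3; decide
  rw [show ("ADJ" == t) = false from beq_eq_false_iff_ne.mpr (fun h => h3 h.symm), if_neg h3]
  by_cases h4 : t = "ADV"
  · subst h4; decide
  rw [show ("ADV" == t) = false from beq_eq_false_iff_ne.mpr (fun h => h4 h.symm), if_neg h4]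
  by_cases h5 : t = "CONJ"
  · subst h5; decide
  rw [show ("CONJ" == t) = false from beq_eq_false_iff_ne.mpr (fun h => h5 h.symm), if_neg h5]
  by_cases h6 : t = "PRON"
  · subst h6; decide
  rw [show ("PRON" == t) = false from beq_eq_false_iff_ne.mpr (fun h => h6 h.symm), if_neg h6]
  by_cases h7 : t = "INT"
  · subst h7; decide
  rw [show ("INT" == t) = false from beq_eq_false_iff_ne.mpr (fun h => h7 h.symm), if_neg h7]
  rfl

-- lexicographic ≤ on the pair key (pvRk t, t)
def pvLexLe (a b : String) : Prop := pvRk a < pvRk b ∨ (pvRk a = pvRk b ∧ a ≤ b)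

theorem pvLexLe_refl (a : String) : pvLexLe a a := Or.inr ⟨rfl, le_refl a⟩

theorem pvLexLe_trans {a b c : String} (h1 : pvLexLe a b) (h2 : pvLexLe b c) : pvLexLe a c := by
  rcases h1 with h1 | ⟨e1, l1⟩ <;> rcases h2 with h2 | ⟨e2, l2⟩
  · exact Or.inl (lt_trans h1 h2)
  · exact Or.inl (e2 ▸ h1)
  · exact Or.inl (e1 ▸ h2)
  · exact Or.inr ⟨e1.trans e2, le_trans l1 l2⟩

-- the fold step of PySem.List.min2? with keys (pvRk ·, id)
def pvStep (acc : Option String) (x : String) : Option String :=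
  match acc with
  | none => some x
  | some m => if (decide (pvRk x < pvRk m) || !decide (pvRk m < pvRk x) && decide (x < m)) = true
              then some x else some m

theorem pvStep_lex (m0 x : String) :
    ∃ m1, pvStep (some m0) x = some m1 ∧ (m1 = x ∨ m1 = m0) ∧ pvLexLe m1 m0 ∧ pvLexLe m1 x := by
  simp only [pvStep]
  split
  · rename_i h
    refine ⟨x, rfl, Or.inl rfl, ?_, pvLexLe_refl x⟩
    simp only [Bool.or_eq_true, Bool.and_eq_true, Bool.not_eq_true', decide_eq_true_eq,
      decide_eq_false_iff_not] at h
    rcases h with h | ⟨h1, h2⟩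
    · exact Or.inl h
    · by_cases hk : pvRk x < pvRk m0
      · exact Or.inl hk
      · exact Or.inr ⟨le_antisymm (not_lt.mp h1) (not_lt.mp hk), le_of_lt h2⟩
  · rename_i h
    refine ⟨m0, rfl, Or.inr rfl, pvLexLe_refl m0, ?_⟩
    simp only [Bool.or_eq_true, Bool.and_eq_true, Bool.not_eq_true', decide_eq_true_eq,
      decide_eq_false_iff_not, not_or, not_and_or] at h
    obtain ⟨h1, h2⟩ := h
    rcases h2 with h2 | h2
    · exact Or.inl (not_not.mp h2)
    · by_cases hk : pvRk m0 < pvRk x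
      · exact Or.inl hk
      · exact Or.inr ⟨le_antisymm (not_lt.mp h1) (not_lt.mp hk), not_lt.mp h2⟩

theorem pvFold_inv : ∀ (xs : List String) (m0 : String),
    ∃ m, xs.foldl pvStep (some m0) = some m ∧ (m = m0 ∨ m ∈ xs) ∧ pvLexLe m m0 ∧
      ∀ y ∈ xs, pvLexLe m y := by
  intro xs
  induction xs with
  | nil => exact fun m0 => ⟨m0, rfl, Or.inl rfl, pvLexLe_refl m0, by simp⟩
  | cons x t ih =>
    intro m0
    obtain ⟨m1, hstep, hmem1, hle0, hlex⟩ := pvStep_lex m0 x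
    obtain ⟨m, hfold, hmem, hle1, hall⟩ := ih m1
    refine ⟨m, ?_, ?_, pvLexLe_trans hle1 hle0, ?_⟩
    · simpa [List.foldl_cons, hstep] using hfold
    · rcases hmem with h | h
      · rcases hmem1 with h1 | h1
        · exact Or.inr (h ▸ h1 ▸ List.mem_cons_self)
        · exact Or.inl (h.trans h1)
      · exact Or.inr (List.mem_cons_of_mem _ h)
    · intro y hy
      rcases List.mem_cons.mp hy with h | h
      · exact h ▸ pvLexLe_trans hle1 hlex
      · exact hall y h

theorem pvMin2_spec (x : String) (t : List String) :
    ∃ m, PySem.List.min2? (x :: t) (fun s => pvRk s) (fun s => s) = some m ∧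
      m ∈ x :: t ∧ ∀ y ∈ x :: t, pvLexLe m y := by
  obtain ⟨m, hfold, hmem, hle, hall⟩ := pvFold_inv t x
  refine ⟨m, ?_, ?_, ?_⟩
  · have hf : PySem.List.min2? (x :: t) (fun s => pvRk s) (fun s => s)
        = List.foldl pvStep none (x :: t) := by
      simp only [PySem.List.min2?]
      exact PySem.List.foldl_congr_mem _ _ _ _ (fun acc y _ => by cases acc <;> rfl)
    rw [hf]
    simpa [List.foldl_cons, pvStep] using hfold
  · rcases hmem with h | h
    · exact h ▸ List.mem_cons_self
    · exact List.mem_cons_of_mem _ h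
  · intro y hy
    rcases List.mem_cons.mp hy with h | h
    · exact h ▸ hle
    · exact hall y h


theorem pvRk_inv (y : String) :
    (pvRk y = 0 → y = "N") ∧ (pvRk y = 1 → y = "V") ∧ (pvRk y = 2 → y = "ADJ") ∧
    (pvRk y = 3 → y = "ADV") ∧ (pvRk y = 4 → y = "CONJ") ∧ (pvRk y = 5 → y = "PRON") ∧
    (pvRk y = 6 → y = "INT") ∧ (0 ≤ pvRk y ∧ pvRk y ≤ 7) := by
  rw [pvRk_eq]
  split_ifs <;> refine ⟨?_, ?_, ?_, ?_, ?_, ?_, ?_, ?_, ?_⟩ <;> first | omega | simp_all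

theorem pvRk_none (y : String) (e1 : y ≠ "N") (e2 : y ≠ "V") (e3 : y ≠ "ADJ") (e4 : y ≠ "ADV")
    (e5 : y ≠ "CONJ") (e6 : y ≠ "PRON") (e7 : y ≠ "INT") : pvRk y = 7 := by
  rw [pvRk_eq]; split_ifs <;> simp_all

-- A's value is forced by B's minimality: if m is in tags and lex-minimal, A returns m
theorem pv_A_is (x : String) (t : List String) (m : String)
    (hm : m ∈ x :: t) (hall : ∀ y ∈ x :: t, pvLexLe m y) :
    select_primary_tag_py (x :: t) = some m := by
  simp only [select_primary_tag_py, pvPriority, List.find?, if_neg (List.cons_ne_nil x t)]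
  by_cases hN : "N" ∈ x :: t
  · simp only [show (x :: t).contains "N" = true from by simpa using hN]
    rcases hall "N" hN with h | ⟨h, _⟩
    · exfalso
      have hb := (pvRk_inv m).2.2.2.2.2.2.2
      rw [show pvRk "N" = 0 from by decide] at h
      omega
    · rw [show pvRk "N" = 0 from by decide] at h
      exact congrArg some (((pvRk_inv m).1) h).symm
  simp only [show (x :: t).contains "N" = false from by simpa using hN]
  by_cases hV : "V" ∈ x :: t
  · simp only [show (x :: t).contains "V" = true from by simpa using hV]
    rcases hall "V" hV with h | ⟨h, _⟩
    · exfalso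
      have hb := (pvRk_inv m).2.2.2.2.2.2.2
      rw [show pvRk "V" = 1 from by decide] at h
      have e : pvRk m = 0 := by omega
      exact hN (((pvRk_inv m).1) e ▸ hm)
    · rw [show pvRk "V" = 1 from by decide] at h
      exact congrArg some (((pvRk_inv m).2.1) h).symm
  simp only [show (x :: t).contains "V" = false from by simpa using hV]
  by_cases hADJ : "ADJ" ∈ x :: t
  · simp only [show (x :: t).contains "ADJ" = true from by simpa using hADJ]
    rcases hall "ADJ" hADJ with h | ⟨h, _⟩
    · exfalso
      have hb := (pvRk_inv m).2.2.2.2.2.2.2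
      rw [show pvRk "ADJ" = 2 from by decide] at h
      have hor : pvRk m = 0 ∨ pvRk m = 1 := by omega
      rcases hor with e|e
      · exact hN (((pvRk_inv m).1) e ▸ hm)
      · exact hV (((pvRk_inv m).2.1) e ▸ hm)
    · rw [show pvRk "ADJ" = 2 from by decide] at h
      exact congrArg some (((pvRk_inv m).2.2.1) h).symm
  simp only [show (x :: t).contains "ADJ" = false from by simpa using hADJ]
  by_cases hADV : "ADV" ∈ x :: t
  · simp only [show (x :: t).contains "ADV" = true from by simpa using hADV]
    rcases hall "ADV" hADV with h | ⟨h, _⟩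
    · exfalso
      have hb := (pvRk_inv m).2.2.2.2.2.2.2
      rw [show pvRk "ADV" = 3 from by decide] at h
      have hor : pvRk m = 0 ∨ pvRk m = 1 ∨ pvRk m = 2 := by omega
      rcases hor with e|e|e
      · exact hN (((pvRk_inv m).1) e ▸ hm)
      · exact hV (((pvRk_inv m).2.1) e ▸ hm)
      · exact hADJ (((pvRk_inv m).2.2.1) e ▸ hm)
    · rw [show pvRk "ADV" = 3 from by decide] at h
      exact congrArg some (((pvRk_inv m).2.2.2.1) h).symm
  simp only [show (x :: t).contains "ADV" = false from by simpa using hADV]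
  by_cases hCONJ : "CONJ" ∈ x :: t
  · simp only [show (x :: t).contains "CONJ" = true from by simpa using hCONJ]
    rcases hall "CONJ" hCONJ with h | ⟨h, _⟩
    · exfalso
      have hb := (pvRk_inv m).2.2.2.2.2.2.2
      rw [show pvRk "CONJ" = 4 from by decide] at h
      have hor : pvRk m = 0 ∨ pvRk m = 1 ∨ pvRk m = 2 ∨ pvRk m = 3 := by omega
      rcases hor with e|e|e|e
      · exact hN (((pvRk_inv m).1) e ▸ hm)
      · exact hV (((pvRk_inv m).2.1) e ▸ hm)
      · exact hADJ (((pvRk_inv m).2.2.1) e ▸ hm)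
      · exact hADV (((pvRk_inv m).2.2.2.1) e ▸ hm)
    · rw [show pvRk "CONJ" = 4 from by decide] at h
      exact congrArg some (((pvRk_inv m).2.2.2.2.1) h).symm
  simp only [show (x :: t).contains "CONJ" = false from by simpa using hCONJ]
  by_cases hPRON : "PRON" ∈ x :: t
  · simp only [show (x :: t).contains "PRON" = true from by simpa using hPRON]
    rcases hall "PRON" hPRON with h | ⟨h, _⟩
    · exfalso
      have hb := (pvRk_inv m).2.2.2.2.2.2.2
      rw [show pvRk "PRON" = 5 from by decide] at h
      have hor : pvRk m = 0 ∨ pvRk m = 1 ∨ pvRk m = 2 ∨ pvRk m = 3 ∨ pvRk m = 4 := by omega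
      rcases hor with e|e|e|e|e
      · exact hN (((pvRk_inv m).1) e ▸ hm)
      · exact hV (((pvRk_inv m).2.1) e ▸ hm)
      · exact hADJ (((pvRk_inv m).2.2.1) e ▸ hm)
      · exact hADV (((pvRk_inv m).2.2.2.1) e ▸ hm)
      · exact hCONJ (((pvRk_inv m).2.2.2.2.1) e ▸ hm)
    · rw [show pvRk "PRON" = 5 from by decide] at h
      exact congrArg some (((pvRk_inv m).2.2.2.2.2.1) h).symm
  simp only [show (x :: t).contains "PRON" = false from by simpa using hPRON]
  by_cases hINT : "INT" ∈ x :: t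
  · simp only [show (x :: t).contains "INT" = true from by simpa using hINT]
    rcases hall "INT" hINT with h | ⟨h, _⟩
    · exfalso
      have hb := (pvRk_inv m).2.2.2.2.2.2.2
      rw [show pvRk "INT" = 6 from by decide] at h
      have hor : pvRk m = 0 ∨ pvRk m = 1 ∨ pvRk m = 2 ∨ pvRk m = 3 ∨ pvRk m = 4 ∨ pvRk m = 5 := by omega
      rcases hor with e|e|e|e|e|e
      · exact hN (((pvRk_inv m).1) e ▸ hm)
      · exact hV (((pvRk_inv m).2.1) e ▸ hm)
      · exact hADJ (((pvRk_inv m).2.2.1) e ▸ hm)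
      · exact hADV (((pvRk_inv m).2.2.2.1) e ▸ hm)
      · exact hCONJ (((pvRk_inv m).2.2.2.2.1) e ▸ hm)
      · exact hPRON (((pvRk_inv m).2.2.2.2.2.1) e ▸ hm)
    · rw [show pvRk "INT" = 6 from by decide] at h
      exact congrArg some (((pvRk_inv m).2.2.2.2.2.2.1) h).symm
  simp only [show (x :: t).contains "INT" = false from by simpa using hINT]
  -- all priority tags absent: every tag has rank 7, so pvLexLe is plain ≤; compare with sorted head
  have h7 : ∀ y ∈ x :: t, pvRk y = 7 := by
    intro y hy
    refine pvRk_none y ?_ ?_ ?_ ?_ ?_ ?_ ?_ <;> (intro e; subst e)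
    · exact hN hy
    · exact hV hy
    · exact hADJ hy
    · exact hADV hy
    · exact hCONJ hy
    · exact hPRON hy
    · exact hINT hy
  cases hs : PySem.List.sorted (x :: t) (fun s => s) false with
  | nil => exact absurd ((PySem.List.sorted_eq_nil_iff _ _ _).mp hs) (List.cons_ne_nil x t)
  | cons h0 rest =>
    have hh0mem : h0 ∈ x :: t := (PySem.List.mem_sorted _ _ _ _).mp (hs ▸ List.mem_cons_self)
    have hh0min : ∀ y ∈ x :: t, h0 ≤ y := PySem.List.key_head_sorted_le (x :: t) (fun s => s) hs
    have hm0 : m ≤ h0 := by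
      rcases hall h0 hh0mem with h | ⟨_, h⟩
      · rw [h7 m hm, h7 h0 hh0mem] at h; omega
      · exact h
    exact congrArg some (le_antisymm (hh0min m hm) hm0)

theorem select_primary_tag_py_spec : Claim_equal_select_primary_tag_py := by
  intro tags _
  unfold Spec_select_primary_tag_py
  cases tags with
  | nil => rfl
  | cons x t =>
    obtain ⟨m, hmin, hmemm, hall⟩ := pvMin2_spec x t
    have hb : select_primary_tag_py_alt (x :: t) = some m := by
      simpa [select_primary_tag_py_alt, if_neg (List.cons_ne_nil x t)] using hmin
    rw [hb]
    exact pv_A_is x t m hmemm hall
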